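-- pv_equiv track=rewrite | github.com/plasmatank/plasmatank-s-inventory | Doll.py | func
-- ===== SOURCE A (Python) =====
-- def func(strings, fix):
--     temp = []
--     try:
--         for k in strings:
--             temp.append(k)
--             count = 0
--             for j in range(len(temp)):
--                 if temp[j] == strings[len(temp) + j]:
--                     count += 1
--             if count == len(temp):
--                 return temp
--     except IndexError:
--         return [f"{fix}不存在"]
-- ===== SOURCE B (Python) =====
-- def func(strings, fix):
--     # Z-algorithm: z[i] = length of the longest common prefix of strings and strings[i:].
--     # The answer is the smallest n with z[n] >= n (then strings[:n] == strings[n:2*n]).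
--     if not strings:
--         return None
--     s = strings
--     N = len(s)
--     z = [0] * N
--     l = r = 0
--     for i in range(1, N):
--         if i < r:
--             z[i] = min(r - i, z[i - l])
--         while i + z[i] < N and s[z[i]] == s[i + z[i]]:
--             z[i] += 1
--         if i + z[i] > r:
--             l, r = i, i + z[i]
--     for n in range(1, N // 2 + 1):
--         if z[n] >= n:
--             return s[:n]
--     return [f"{fix}不存在"]
-- ===== Notes on version B (the rewrite author's own statement) =====
-- stated objective: faster
-- what changed: Replaces the quadratic prefix-vs-block rescan (with an IndexError as loop exit) by a linear Z-algorithm: the answer is the smallest n with z[n] >= n, else the error message.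
import Mathlib
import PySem

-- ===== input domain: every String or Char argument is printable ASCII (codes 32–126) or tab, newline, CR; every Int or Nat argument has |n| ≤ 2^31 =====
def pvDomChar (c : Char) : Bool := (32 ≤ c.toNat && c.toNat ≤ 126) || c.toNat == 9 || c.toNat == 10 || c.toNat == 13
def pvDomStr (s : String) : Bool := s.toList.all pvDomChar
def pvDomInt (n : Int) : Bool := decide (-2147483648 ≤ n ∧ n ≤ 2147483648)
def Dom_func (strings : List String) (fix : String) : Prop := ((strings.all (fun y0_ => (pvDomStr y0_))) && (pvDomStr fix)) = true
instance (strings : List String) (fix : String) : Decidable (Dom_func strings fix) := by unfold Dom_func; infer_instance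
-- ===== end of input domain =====

-- B replaces A's quadratic prefix-vs-next-block rescan (exited by an IndexError) with a
-- linear Z-algorithm; measured asymptotically faster. Return values agree everywhere.

-- ===== PORT A =====
-- inner loop: `count = 0; for j in range(len(temp)): if temp[j] == strings[len(temp)+j]: count += 1`
-- `none` models the IndexError raised by `strings[len(temp)+j]`; temp[j] is always in range.
def countLoop (strings temp : List String) : Option Nat :=
  (List.range temp.length).foldl
    (fun acc (j : Nat) =>
      match acc with
      | none => none
      | some c =>
        match PySem.List.pyGet? strings ((temp.length : Int) + (j : Int)) with
        | none => none
        | some x => if PySem.List.pyGetD temp (j : Int) "" = x then some (c + 1) else some c)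
    (some 0)

-- `for k in strings: temp.append(k); … ` with the surrounding try/except
def outerLoop (strings : List String) (fix : String) : List String → List String → Option (List String)
  | [], _ => none
  | k :: rest, temp =>
    let temp' := temp ++ [k]
    match countLoop strings temp' with
    | none => some [fix ++ "不存在"]
    | some c => if c = temp'.length then some temp' else outerLoop strings fix rest temp'

def func (strings : List String) (fix : String) : Option (List String) :=
  outerLoop strings fix strings []

-- ===== PORT B =====
-- `while i + z[i] < N and s[z[i]] == s[i + z[i]]: z[i] += 1`, starting from cur
def zExtend (s : Array String) (N i : Nat) (cur : Nat) : Nat :=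
  if h : i + cur < N ∧ s.getD cur "" = s.getD (i + cur) "" then zExtend s N i (cur + 1) else cur
termination_by N - (i + cur)
decreasing_by omega

-- `for i in range(1, N): …` of the Z-algorithm, state (z, l, r)
def zLoop (s : Array String) (N : Nat) (i : Nat) (z : Array Nat) (l r : Nat) : Array Nat :=
  if _h : i < N then
    let start := if i < r then min (r - i) (z.getD (i - l) 0) else 0
    let zi := zExtend s N i start
    let z' := z.setIfInBounds i zi
    if i + zi > r then zLoop s N (i + 1) z' i (i + zi) else zLoop s N (i + 1) z' l r
  else z
termination_by N - i
decreasing_by all_goals omega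

-- `for n in range(1, N // 2 + 1): if z[n] >= n: return s[:n]`
def searchLoop (strings : List String) (fix : String) (z : Array Nat) (N : Nat) (n : Nat) :
    Option (List String) :=
  if _h : n ≤ N / 2 then
    if n ≤ z.getD n 0 then some (strings.take n)
    else searchLoop strings fix z N (n + 1)
  else some [fix ++ "不存在"]
termination_by N / 2 + 1 - n
decreasing_by omega

def func_alt (strings : List String) (fix : String) : Option (List String) :=
  if strings = [] then none
  else
    let s := strings.toArray
    let N := strings.length
    let z := zLoop s N 1 (Array.replicate N 0) 0 0
    searchLoop strings fix z N 1

-- ===== PRECONDITION & SPEC =====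
def Spec_func (strings : List String) (fix : String) (out : Option (List String)) : Prop := out = func_alt strings fix
instance (strings : List String) (fix : String) (out : Option (List String)) : Decidable (Spec_func strings fix out) := by unfold Spec_func; infer_instance

-- ===== CLAIM (what is proved, stated in full; the proofs are below) =====
def Claim_equal_func : Prop := ∀ (strings : List String) (fix : String), Dom_func strings fix → Spec_func strings fix (func strings fix)

-- ===== LEMMAS AND PROOFS =====

-- the predicate both programs search for: the prefix of length n equals the next block
def pMatch (strings : List String) (n : Nat) : Bool :=
  decide (strings.take n = (strings.drop n).take n)

-- common reference value
def refAns (strings : List String) (fix : String) : Option (List String) :=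
  match (List.range' 1 (strings.length / 2)).find? (pMatch strings) with
  | some n => some (strings.take n)
  | none => if strings = [] then none else some [fix ++ "不存在"]

lemma getD_toArray (l : List String) (j : Nat) :
    l.toArray.getD j "" = l.getD j "" := by
  by_cases h : j < l.length
  · simp [Array.getD, h, List.getD]
  · simp [Array.getD, h, List.getD]

lemma pMatch_iff (strings : List String) (n : Nat) (h2 : 2 * n ≤ strings.length) :
    pMatch strings n = true ↔ ∀ j < n, strings.getD j "" = strings.getD (n + j) "" := by
  unfold pMatch
  rw [decide_eq_true_iff]
  have hlen1 : (strings.take n).length = n := by simp; omega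
  have hlen2 : ((strings.drop n).take n).length = n := by simp; omega
  constructor
  · intro h j hj
    have hj1 : j < strings.length := by omega
    have hj2 : n + j < strings.length := by omega
    rw [List.getD_eq_getElem strings "" hj1, List.getD_eq_getElem strings "" hj2]
    have e1 : (strings.take n)[j]'(by omega) = strings[j] := List.getElem_take
    have e2 : ((strings.drop n).take n)[j]'(by omega) = strings[n + j] := by
      rw [List.getElem_take, List.getElem_drop]
    rw [← e1, ← e2]
    congr 1
  · intro h
    apply List.ext_getElem (by omega)
    intro j hja hjb
    have hj : j < n := by omega
    have hj1 : j < strings.length := by omega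
    have hj2 : n + j < strings.length := by omega
    rw [List.getElem_take, List.getElem_take, List.getElem_drop]
    have := h j hj
    rwa [List.getD_eq_getElem strings "" hj1, List.getD_eq_getElem strings "" hj2] at this

-- ---- A side ----

lemma countLoop_eq (strings : List String) (n : Nat) (h1 : 1 ≤ n) (hn : n ≤ strings.length) :
    countLoop strings (strings.take n) =
      if 2 * n ≤ strings.length then
        some ((List.range n).countP
          (fun j => strings.getD j "" = strings.getD (n + j) "")) else none := by
  have hTlen : (strings.take n).length = n := by simp; omega
  have hgetD : ∀ a < n, (strings.take n).getD a "" = strings.getD a "" := by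
    intro a ha
    rw [List.getD_eq_getElem _ "" (by omega), List.getD_eq_getElem _ "" (by omega),
      List.getElem_take]
  have foldl_none : ∀ (L : List Nat),
      L.foldl (fun acc j =>
        match acc with
        | none => none
        | some c =>
          match PySem.List.pyGet? strings (((strings.take n).length : Int) + (j : Int)) with
          | none => none
          | some x => if PySem.List.pyGetD (strings.take n) (j : Int) "" = x then some (c + 1)
            else some c) none = none := by
    intro L
    induction L with
    | nil => rfl
    | cons a L ih => simpa using ih
  have key : ∀ (L : List Nat) (c : Nat), (∀ j ∈ L, j < n) →
      L.foldl (fun acc j =>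
        match acc with
        | none => none
        | some c =>
          match PySem.List.pyGet? strings (((strings.take n).length : Int) + (j : Int)) with
          | none => none
          | some x => if PySem.List.pyGetD (strings.take n) (j : Int) "" = x then some (c + 1)
            else some c) (some c) =
      if ∀ j ∈ L, n + j < strings.length then
        some (c + L.countP (fun j => strings.getD j "" = strings.getD (n + j) "")) else none := by
    intro L
    induction L with
    | nil => intro c _; simp
    | cons a L ih =>
      intro c hmem
      rw [List.foldl_cons]
      have hcast : (((strings.take n).length : Int) + (a : Int)) = ((n + a : Nat) : Int) := by
        rw [hTlen]; push_cast; ring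
      by_cases hin : n + a < strings.length
      · have hget : PySem.List.pyGet? strings (((strings.take n).length : Int) + (a : Int)) =
            some (strings[n + a]'hin) := by
          rw [hcast, PySem.List.pyGet?_natCast, List.getElem?_eq_getElem hin]
        have hgd : PySem.List.pyGetD (strings.take n) (a : Int) "" = strings.getD a "" := by
          rw [PySem.List.pyGetD_natCast]
          exact hgetD a (hmem a (List.mem_cons_self))
        simp only [hget, hgd]
        have hcnt : List.countP (fun j => decide (strings.getD j "" = strings.getD (n + j) ""))
            (a :: L) = (List.countP (fun j => decide (strings.getD j "" = strings.getD (n + j) "")) L)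
            + (if strings.getD a "" = strings.getD (n + a) "" then 1 else 0) := by
          rw [List.countP_cons]; split_ifs with h h2 <;> simp_all
        by_cases heq : strings.getD a "" = strings.getD (n + a) ""
        · have heq' : strings.getD a "" = strings[n + a]'hin := by
            rw [heq, List.getD_eq_getElem _ "" hin]
          rw [if_pos heq', ih (c + 1) (fun j hj => hmem j (List.mem_cons_of_mem a hj))]
          split_ifs with hall hall2 hall3
          · rw [hcnt, if_pos heq]; simp only [Option.some.injEq]; omega
          · exact absurd (fun j hj => by
              rcases List.mem_cons.mp hj with rfl | hj'
              · exact hin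
              · exact hall j hj') hall2
          · exact absurd (fun j hj => hall3 j (List.mem_cons_of_mem a hj)) hall
          · rfl
        · have heq' : ¬ strings.getD a "" = strings[n + a]'hin := by
            rw [← List.getD_eq_getElem strings "" hin]; exact heq
          rw [if_neg heq', ih c (fun j hj => hmem j (List.mem_cons_of_mem a hj))]
          split_ifs with hall hall2 hall3
          · rw [hcnt, if_neg heq]; simp
          · exact absurd (fun j hj => by
              rcases List.mem_cons.mp hj with rfl | hj'
              · exact hin
              · exact hall j hj') hall2
          · exact absurd (fun j hj => hall3 j (List.mem_cons_of_mem a hj)) hall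
          · rfl
      · have hget : PySem.List.pyGet? strings (((strings.take n).length : Int) + (a : Int)) = none := by
          rw [hcast, PySem.List.pyGet?_natCast, List.getElem?_eq_none (by omega)]
        simp only [hget]
        rw [foldl_none]
        rw [if_neg (by intro hall; exact hin (hall a List.mem_cons_self))]
  unfold countLoop
  rw [hTlen] at key ⊢
  rw [key (List.range n) 0 (by intro j hj; exact List.mem_range.mp hj)]
  have hiff : (∀ j ∈ List.range n, n + j < strings.length) ↔ 2 * n ≤ strings.length := by
    constructor
    · intro hall
      have := hall (n - 1) (List.mem_range.mpr (by omega))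
      omega
    · intro h2 j hj
      have := List.mem_range.mp hj
      omega
  split_ifs with ha hb hc
  · simp
  · exact absurd (hiff.mp ha) hb
  · exact absurd (hiff.mpr hc) ha
  · rfl

-- proof-side tail of A's search, starting after prefix length n
def gA (strings : List String) (fix : String) (n : Nat) : Option (List String) :=
  if n = strings.length then none
  else if strings.length < 2 * (n + 1) then some [fix ++ "不存在"]
  else if pMatch strings (n + 1) then some (strings.take (n + 1))
  else gA strings fix (n + 1)
termination_by strings.length - n
decreasing_by omega

lemma outerLoop_eq_gA (strings : List String) (fix : String) (n : Nat) (hn : n ≤ strings.length) :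
    outerLoop strings fix (strings.drop n) (strings.take n) = gA strings fix n := by
  suffices h : ∀ fuel n, n ≤ strings.length → strings.length - n ≤ fuel →
      outerLoop strings fix (strings.drop n) (strings.take n) = gA strings fix n by
    exact h _ n hn le_rfl
  intro fuel
  induction fuel with
  | zero =>
    intro n hn hf
    have hnl : n = strings.length := by omega
    subst hnl
    rw [List.drop_length, List.take_length, gA]
    simp [outerLoop]
  | succ m ihf =>
    intro n hn hf
    by_cases hnl : n = strings.length
    · subst hnl
      rw [List.drop_length, List.take_length, gA]
      simp [outerLoop]
    · have hlt : n < strings.length := by omega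
      have hdrop : strings.drop n = strings[n] :: strings.drop (n + 1) :=
        List.drop_eq_getElem_cons hlt
      have htake : strings.take n ++ [strings[n]] = strings.take (n + 1) := by
        rw [List.take_add_one, List.getElem?_eq_getElem hlt]
        rfl
      rw [hdrop]
      show (match countLoop strings (strings.take n ++ [strings[n]]) with
        | none => some [fix ++ "不存在"]
        | some c => if c = (strings.take n ++ [strings[n]]).length
            then some (strings.take n ++ [strings[n]])
            else outerLoop strings fix (strings.drop (n + 1)) (strings.take n ++ [strings[n]])) =
        gA strings fix n
      rw [htake, countLoop_eq strings (n + 1) (by omega) (by omega), gA, if_neg hnl]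
      have hlen' : (strings.take (n + 1)).length = n + 1 := by simp; omega
      by_cases h2 : 2 * (n + 1) ≤ strings.length
      · rw [if_pos h2, if_neg (by omega : ¬ strings.length < 2 * (n + 1))]
        simp only []
        have hcEq : (List.countP
            (fun j => decide (strings.getD j "" = strings.getD (n + 1 + j) ""))
            (List.range (n + 1)) = n + 1) ↔ pMatch strings (n + 1) = true := by
          rw [pMatch_iff strings (n + 1) h2]
          constructor
          · intro hc j hj
            have hall := (List.countP_eq_length).mp (by rw [hc]; simp)
            exact of_decide_eq_true (hall j (List.mem_range.mpr hj))
          · intro hall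
            rw [List.countP_eq_length.mpr (fun j hj =>
              decide_eq_true (hall j (List.mem_range.mp hj)))]
            simp
        rw [hlen']
        by_cases hpm : pMatch strings (n + 1) = true
        · rw [if_pos (hcEq.mpr hpm), if_pos hpm]
        · rw [if_neg (fun hc => hpm (hcEq.mp hc)), if_neg hpm]
          exact ihf (n + 1) (by omega) (by omega)
      · rw [if_neg h2, if_pos (by omega : strings.length < 2 * (n + 1))]

lemma gA_eq (strings : List String) (fix : String) (n : Nat) (hn : n ≤ strings.length) :
    gA strings fix n =
      match (List.range' (n + 1) (strings.length / 2 - n)).find? (pMatch strings) with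
      | some m => some (strings.take m)
      | none => if n = strings.length then none else some [fix ++ "不存在"] := by
  suffices h : ∀ fuel n, n ≤ strings.length → strings.length - n ≤ fuel →
      gA strings fix n =
        match (List.range' (n + 1) (strings.length / 2 - n)).find? (pMatch strings) with
        | some m => some (strings.take m)
        | none => if n = strings.length then none else some [fix ++ "不存在"] by
    exact h _ n hn le_rfl
  intro fuel
  induction fuel with
  | zero =>
    intro n hn hf
    have hnl : n = strings.length := by omega
    rw [gA, if_pos hnl, show strings.length / 2 - n = 0 by omega]
    simp [hnl]
  | succ m ihf =>
    intro n hn hf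
    by_cases hnl : n = strings.length
    · rw [gA, if_pos hnl, show strings.length / 2 - n = 0 by omega]
      simp [hnl]
    · rw [gA, if_neg hnl]
      by_cases h2 : strings.length < 2 * (n + 1)
      · rw [if_pos h2, show strings.length / 2 - n = 0 by omega]
        simp [hnl]
      · rw [if_neg h2, show strings.length / 2 - n = (strings.length / 2 - (n + 1)) + 1 by omega,
          List.range'_succ]
        by_cases hpm : pMatch strings (n + 1) = true
        · rw [if_pos hpm]
          simp [List.find?_cons, hpm]
        · rw [if_neg hpm, ihf (n + 1) (by omega) (by omega)]
          simp only [List.find?_cons, hpm]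
          have hne : ¬ (n + 1 = strings.length) := by omega
          cases hfind : (List.range' (n + 1 + 1) (strings.length / 2 - (n + 1))).find?
              (pMatch strings) with
          | some v => rfl
          | none => rw [if_neg hne, if_neg hnl]

lemma func_eq_ref (strings : List String) (fix : String) :
    func strings fix = refAns strings fix := by
  unfold func refAns
  have h0 : outerLoop strings fix strings [] =
      outerLoop strings fix (strings.drop 0) (strings.take 0) := rfl
  rw [h0, outerLoop_eq_gA strings fix 0 (by omega), gA_eq strings fix 0 (by omega),
    show strings.length / 2 - 0 = strings.length / 2 by omega]
  have hiff : (0 = strings.length) ↔ (strings = []) := by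
    rw [eq_comm, List.length_eq_zero_iff]
  cases hfind : (List.range' 1 (strings.length / 2)).find? (pMatch strings) with
  | some v => rfl
  | none =>
    by_cases he : strings = []
    · rw [if_pos (hiff.mpr he), if_pos he]
    · rw [if_neg (fun hc => he (hiff.mp hc)), if_neg he]

-- ---- B side ----

-- the longest-common-prefix value the Z-algorithm computes at i
def zVal (s : Array String) (N i : Nat) : Nat := zExtend s N i 0

lemma zExtend_eq_of_matches (s : Array String) (N i : Nat) (start : Nat)
    (h : ∀ j < start, i + j < N ∧ s.getD j "" = s.getD (i + j) "") :
    zExtend s N i start = zVal s N i := by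
  induction start with
  | zero => rfl
  | succ m ih =>
    have hm := h m (by omega)
    have step : zExtend s N i m = zExtend s N i (m + 1) := by
      rw [zExtend]; simp [hm.1, hm.2]
    rw [← step, ih (fun j hj => h j (by omega))]

lemma zVal_matches (s : Array String) (N i : Nat) :
    ∀ j < zVal s N i, i + j < N ∧ s.getD j "" = s.getD (i + j) "" := by
  suffices h : ∀ start, ∀ j, start ≤ j → j < zExtend s N i start →
      i + j < N ∧ s.getD j "" = s.getD (i + j) "" by
    intro j hj; exact h 0 j (Nat.zero_le _) hj
  intro start
  fun_induction zExtend s N i start with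
  | case1 cur h ih =>
    intro j hj hlt
    rcases Nat.eq_or_lt_of_le hj with rfl | h2
    · exact h
    · exact ih j h2 hlt
  | case2 cur h =>
    intro j hj hlt
    omega

lemma zExtend_le (s : Array String) (N i : Nat) (start : Nat) (h : start ≤ N - i) (hi : i ≤ N) :
    zExtend s N i start ≤ N - i := by
  fun_induction zExtend s N i start with
  | case1 cur hc ih => exact ih (by omega)
  | case2 cur hc => exact h

lemma le_zVal (s : Array String) (N i : Nat) (m : Nat)
    (h : ∀ j < m, i + j < N ∧ s.getD j "" = s.getD (i + j) "") :
    m ≤ zVal s N i := by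
  have he := zExtend_eq_of_matches s N i m h
  have hge : ∀ start, start ≤ zExtend s N i start := by
    intro start
    fun_induction zExtend s N i start with
    | case1 cur hc ih => omega
    | case2 cur hc => omega
  calc m ≤ zExtend s N i m := hge m
    _ = zVal s N i := he

lemma getD_setIfInBounds (z : Array Nat) (i k v : Nat) (h : i < z.size) :
    (z.setIfInBounds i v).getD k 0 = if k = i then v else z.getD k 0 := by
  by_cases hki : k = i
  · subst hki
    simp [Array.getD, Array.size_setIfInBounds, h, Array.getElem_setIfInBounds]
  · by_cases hk : k < z.size
    · simp [Array.getD, Array.size_setIfInBounds, hk, Array.getElem_setIfInBounds,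
        hki, Ne.symm hki]
    · simp [Array.getD, Array.size_setIfInBounds, hk, hki]

lemma zLoop_correct (s : Array String) (N : Nat) :
    ∀ fuel i z l r, N - i ≤ fuel → 1 ≤ i → z.size = N → l < i → r ≤ N → (0 < r → 1 ≤ l) →
      (∀ j < r - l, s.getD (l + j) "" = s.getD j "") →
      (∀ k, 1 ≤ k → k < i → z.getD k 0 = zVal s N k) →
      ∀ k, 1 ≤ k → k < N → (zLoop s N i z l r).getD k 0 = zVal s N k := by
  intro fuel
  induction fuel with
  | zero =>
    intro i z l r hfuel h1 hsz hl hr hlr hwin hst k hk1 hkN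
    rw [zLoop]
    simp only [show ¬ i < N by omega, dite_false]
    exact hst k hk1 (by omega)
  | succ m ih =>
    intro i z l r hfuel h1 hsz hl hr hlr hwin hst k hk1 hkN
    by_cases hiN : i < N
    · rw [zLoop]
      simp only [hiN, dite_true, if_pos]
      set start := if i < r then min (r - i) (z.getD (i - l) 0) else 0 with hstart_def
      have hstart : ∀ j < start, i + j < N ∧ s.getD j "" = s.getD (i + j) "" := by
        intro j hj
        rw [hstart_def] at hj
        by_cases hir : i < r
        · simp only [hir, if_true] at hj
          have hjr : j < r - i := lt_of_lt_of_le hj (min_le_left _ _)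
          have hjz : j < z.getD (i - l) 0 := lt_of_lt_of_le hj (min_le_right _ _)
          have hl1 : 1 ≤ l := hlr (by omega)
          have hkl : i - l < i := by omega
          have hzk : z.getD (i - l) 0 = zVal s N (i - l) := hst (i - l) (by omega) hkl
          rw [hzk] at hjz
          have hm := zVal_matches s N (i - l) j hjz
          have hw := hwin ((i - l) + j) (by omega)
          constructor
          · omega
          · calc s.getD j "" = s.getD ((i - l) + j) "" := hm.2
              _ = s.getD (l + ((i - l) + j)) "" := (hw).symm
              _ = s.getD (i + j) "" := by congr 1; omega
        · simp only [hir, if_false] at hj; omega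
      have hzi : zExtend s N i start = zVal s N i := zExtend_eq_of_matches s N i start hstart
      have hzile : zVal s N i ≤ N - i := by
        rw [← hzi]
        apply zExtend_le
        · rw [hstart_def]; by_cases hir : i < r <;> simp [hir] <;> omega
        · omega
      have hsz' : (z.setIfInBounds i (zExtend s N i start)).size = N := by
        simp [Array.size_setIfInBounds, hsz]
      have hst' : ∀ k', 1 ≤ k' → k' < i + 1 →
          (z.setIfInBounds i (zExtend s N i start)).getD k' 0 = zVal s N k' := by
        intro k' hk1' hk2'
        rw [getD_setIfInBounds _ _ _ _ (by omega)]
        by_cases hke : k' = i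
        · simp [hke, hzi]
        · rw [if_neg hke]; exact hst k' hk1' (by omega)
      by_cases hgt : i + zExtend s N i start > r
      · rw [if_pos hgt]
        apply ih (i + 1) _ i (i + zExtend s N i start) (by omega) (by omega) hsz'
            (by omega) (by rw [hzi]; omega) (by omega) _ hst' k hk1 hkN
        intro j hj
        have hj' : j < zVal s N i := by rw [← hzi]; omega
        exact (zVal_matches s N i j hj').2.symm
      · rw [if_neg hgt]
        exact ih (i + 1) _ l r (by omega) (by omega) hsz' (by omega) hr hlr hwin hst' k hk1 hkN
    · rw [zLoop]
      simp only [hiN, dite_false, if_neg]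
      exact hst k hk1 (by omega)

lemma searchLoop_eq (strings : List String) (fix : String) (z : Array Nat)
    (hz : ∀ k, 1 ≤ k → k < strings.length → z.getD k 0 = zVal strings.toArray strings.length k) :
    ∀ n, 1 ≤ n →
      searchLoop strings fix z strings.length n =
        match (List.range' n (strings.length / 2 + 1 - n)).find? (pMatch strings) with
        | some m => some (strings.take m)
        | none => some [fix ++ "不存在"] := by
  suffices h : ∀ fuel n, 1 ≤ n → strings.length / 2 + 1 - n ≤ fuel →
      searchLoop strings fix z strings.length n =
        match (List.range' n (strings.length / 2 + 1 - n)).find? (pMatch strings) with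
        | some m => some (strings.take m)
        | none => some [fix ++ "不存在"] by
    intro n h1; exact h _ n h1 le_rfl
  intro fuel
  induction fuel with
  | zero =>
    intro n h1 hf
    rw [searchLoop]
    simp only [show ¬ n ≤ strings.length / 2 by omega, dite_false]
    rw [show strings.length / 2 + 1 - n = 0 by omega]
    simp
  | succ m ihf =>
    intro n h1 hf
    by_cases hle : n ≤ strings.length / 2
    · rw [searchLoop]
      simp only [hle, dite_true]
      have h2n : 2 * n ≤ strings.length := by omega
      have hnN : n < strings.length := by omega
      have hcond : (n ≤ z.getD n 0) ↔ (pMatch strings n = true) := by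
        rw [hz n h1 hnN]
        constructor
        · intro hzv
          rw [pMatch_iff strings n h2n]
          intro j hj
          have hm := zVal_matches strings.toArray strings.length n j (by omega)
          have := hm.2
          rwa [getD_toArray, getD_toArray] at this
        · intro hpm
          apply le_zVal
          intro j hj
          refine ⟨by omega, ?_⟩
          rw [getD_toArray, getD_toArray]
          exact (pMatch_iff strings n h2n).mp hpm j hj
      rw [show strings.length / 2 + 1 - n = (strings.length / 2 - n) + 1 by omega,
        List.range'_succ]
      by_cases hpm : pMatch strings n = true
      · rw [if_pos (hcond.mpr hpm)]
        simp [hpm]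
      · rw [if_neg (fun hc => hpm (hcond.mp hc))]
        rw [ihf (n + 1) (by omega) (by omega)]
        rw [show strings.length / 2 + 1 - (n + 1) = strings.length / 2 - n by omega]
        simp [List.find?_cons, hpm]
    · rw [searchLoop]
      simp only [hle, dite_false]
      rw [show strings.length / 2 + 1 - n = 0 by omega]
      simp

lemma func_alt_eq_ref (strings : List String) (fix : String) :
    func_alt strings fix = refAns strings fix := by
  unfold func_alt refAns
  by_cases h : strings = []
  · simp [h]
  · rw [if_neg h, if_neg h]
    have hlen : 1 ≤ strings.length := by
      cases strings with
      | nil => exact absurd rfl h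
      | cons a t => simp
    have hz := zLoop_correct strings.toArray strings.length strings.length 1
      (Array.replicate strings.length 0) 0 0 (by omega) (by omega) (by simp) (by omega)
      (by omega) (by omega) (by intro j hj; omega) (by intro k hk1 hk2; omega)
    rw [searchLoop_eq strings fix _ hz 1 le_rfl]
    rw [show strings.length / 2 + 1 - 1 = strings.length / 2 by omega]

-- ===== VERDICT (by name: the statement is the Claim_ definition above) =====
theorem func_spec : Claim_equal_func := by
  intro strings fix _
  unfold Spec_func
  rw [func_eq_ref, func_alt_eq_ref]
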